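-- pv_equiv track=rewrite | github.com/gcorcora/ngram_model | tokenizer.py | n_gram_context_maker
-- ===== SOURCE A (Python) =====
-- def n_gram_context_maker(text: list[list[int]], ngram_len: int) -> tuple[dict[tuple[int, ...], int], dict[tuple[int, ...], int]]:
--     #returns two dictionaries, one for context and one for ngram count
--     ngram_count = {}
--     context_count = {}
--
--     for line in text: #already tokenized
--         #go length of line, collecting each ngram
--         for i in range(len(line) - ngram_len + 1):
--             #at each i, grab ngram
--             ngram = line[i: i+ngram_len] #slice of length ngram
--             #but slice of list is not what need
--             ngram = tuple(ngram) #make into tuple so can be dict key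
--
--             #context is first part of ngram
--             context = ngram[0:-1]
--             if ngram in ngram_count:
--                 ngram_count[ngram] += 1
--             else:
--                 ngram_count[ngram] = 1
--             if context in context_count:
--                 context_count[context] += 1
--             else:
--                 context_count[context] = 1
--
--     return ngram_count, context_count
-- ===== SOURCE B (Python) =====
-- def n_gram_context_maker(text: list[list[int]], ngram_len: int) -> tuple[dict[tuple[int, ...], int], dict[tuple[int, ...], int]]:
--     # Pass 1: count the n-grams only.
--     ngram_count = {}
--     for line in text:
--         for i in range(len(line) - ngram_len + 1):
--             ng = tuple(line[i: i + ngram_len])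
--             ngram_count[ng] = ngram_count.get(ng, 0) + 1
--     # Pass 2: the context distribution is the marginal of the n-gram counts.
--     context_count = {}
--     for ng, c in ngram_count.items():
--         ctx = ng[0:-1]
--         context_count[ctx] = context_count.get(ctx, 0) + c
--     return ngram_count, context_count
-- ===== Notes on version B (the rewrite author's own statement) =====
-- stated objective: alternative
-- what changed: B scans the text once building only the n-gram counts, then derives the context counts in a second pass as the marginal of the n-gram table (adding each n-gram's count to its prefix's entry), instead of A's interleaved counting of both dictionaries at every position.
import Mathlib
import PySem

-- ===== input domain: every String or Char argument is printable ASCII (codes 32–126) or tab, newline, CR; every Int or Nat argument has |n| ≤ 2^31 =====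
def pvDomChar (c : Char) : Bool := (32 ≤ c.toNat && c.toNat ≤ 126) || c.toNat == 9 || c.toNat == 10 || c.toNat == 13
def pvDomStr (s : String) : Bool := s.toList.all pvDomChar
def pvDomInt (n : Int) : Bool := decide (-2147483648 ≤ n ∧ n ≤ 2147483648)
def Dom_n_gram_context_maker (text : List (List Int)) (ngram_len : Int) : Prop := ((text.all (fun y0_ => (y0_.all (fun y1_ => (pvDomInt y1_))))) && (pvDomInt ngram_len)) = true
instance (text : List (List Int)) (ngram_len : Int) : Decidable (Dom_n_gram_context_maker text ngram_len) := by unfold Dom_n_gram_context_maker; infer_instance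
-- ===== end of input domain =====

-- B derives the context counts as the marginal of the n-gram counts in a second pass
-- instead of counting both dictionaries while scanning; same return value, proved below.

-- ===== PORT A =====
def n_gram_context_maker (text : List (List Int)) (ngram_len : Int) : (List (List Int × Int)) × (List (List Int × Int)) :=
  let st := text.foldl (fun st line =>
      (PySem.List.pyRange 0 ((line.length : Int) - ngram_len + 1) 1).foldl (fun st i =>
        let ngram := PySem.List.slice line (some i) (some (i + ngram_len))
        let context := PySem.List.slice ngram (some 0) (some (-1))
        (if st.1.contains ngram then st.1.insert ngram (st.1.getD ngram 0 + 1)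
         else st.1.insert ngram 1,
         if st.2.contains context then st.2.insert context (st.2.getD context 0 + 1)
         else st.2.insert context 1)) st)
    ((PySem.Dict.empty : PySem.Dict (List Int) Int), (PySem.Dict.empty : PySem.Dict (List Int) Int))
  (st.1.items, st.2.items)

-- ===== PORT B =====
def n_gram_context_maker_alt (text : List (List Int)) (ngram_len : Int) : (List (List Int × Int)) × (List (List Int × Int)) :=
  let ngram_count : PySem.Dict (List Int) Int := text.foldl (fun nc line =>
      (PySem.List.pyRange 0 ((line.length : Int) - ngram_len + 1) 1).foldl (fun nc i =>
        let ng := PySem.List.slice line (some i) (some (i + ngram_len))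
        nc.insert ng (nc.getD ng 0 + 1)) nc)
    PySem.Dict.empty
  let context_count : PySem.Dict (List Int) Int := ngram_count.items.foldl (fun cc p =>
      let ctx := PySem.List.slice p.1 (some 0) (some (-1))
      cc.insert ctx (cc.getD ctx 0 + p.2)) PySem.Dict.empty
  (ngram_count.items, context_count.items)

-- ===== PRECONDITION & SPEC =====
def Spec_n_gram_context_maker (text : List (List Int)) (ngram_len : Int) (out : (List (List Int × Int)) × (List (List Int × Int))) : Prop := out = n_gram_context_maker_alt text ngram_len
instance (text : List (List Int)) (ngram_len : Int) (out : (List (List Int × Int)) × (List (List Int × Int))) : Decidable (Spec_n_gram_context_maker text ngram_len out) := by unfold Spec_n_gram_context_maker; infer_instance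

-- ===== CLAIM (what is proved, stated in full; the proofs are below) =====
def Claim_equal_n_gram_context_maker : Prop := ∀ (text : List (List Int)) (ngram_len : Int), Dom_n_gram_context_maker text ngram_len → Spec_n_gram_context_maker text ngram_len (n_gram_context_maker text ngram_len)

-- ===== LEMMAS AND PROOFS =====

-- the stream of n-grams A and B both scan, and the shared context slice
def pvGrams (ngram_len : Int) (line : List Int) : List (List Int) :=
  (PySem.List.pyRange 0 ((line.length : Int) - ngram_len + 1) 1).map
    (fun i => PySem.List.slice line (some i) (some (i + ngram_len)))

def pvG (text : List (List Int)) (ngram_len : Int) : List (List Int) :=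
  text.flatMap (pvGrams ngram_len)

def pvCtx (g : List Int) : List Int := PySem.List.slice g (some 0) (some (-1))

-- weighted counting step / fold (dict[k] = dict.get(k, 0) + w)
def pvWStep (cc : PySem.Dict (List Int) Int) (p : List Int × Int) : PySem.Dict (List Int) Int :=
  cc.insert p.1 (cc.getD p.1 0 + p.2)

def pvWFold (L : List (List Int × Int)) (d : PySem.Dict (List Int) Int) : PySem.Dict (List Int) Int :=
  L.foldl pvWStep d

-- the if/else counting step is the unconditional get-default step
lemma pvStep_if_eq (d : PySem.Dict (List Int) Int) (g : List Int) :
    (if d.contains g then d.insert g (d.getD g 0 + 1) else d.insert g 1)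
      = d.insert g (d.getD g 0 + 1) := by
  by_cases h : d.contains g
  · simp [h]
  · simp only [Bool.not_eq_true] at h
    simp [h, PySem.Dict.getD_of_not_contains d 0 h]

-- A's loop body, as a function of the n-gram it extracts
def pvPairStep (st : PySem.Dict (List Int) Int × PySem.Dict (List Int) Int) (g : List Int) :
    PySem.Dict (List Int) Int × PySem.Dict (List Int) Int :=
  let context := PySem.List.slice g (some 0) (some (-1))
  (if st.1.contains g then st.1.insert g (st.1.getD g 0 + 1) else st.1.insert g 1,
   if st.2.contains context then st.2.insert context (st.2.getD context 0 + 1)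
   else st.2.insert context 1)

-- the pair-fold is two independent folds
lemma pvPairStep_foldl (G : List (List Int)) (d1 d2 : PySem.Dict (List Int) Int) :
    G.foldl pvPairStep (d1, d2)
      = (G.foldl (fun d g => d.insert g (d.getD g 0 + 1)) d1,
         G.foldl (fun d g => pvWStep d (pvCtx g, 1)) d2) := by
  induction G generalizing d1 d2 with
  | nil => rfl
  | cons g G ih =>
    simp only [List.foldl_cons]
    show G.foldl pvPairStep
        (if d1.contains g then d1.insert g (d1.getD g 0 + 1) else d1.insert g 1,
         if d2.contains (pvCtx g) then d2.insert (pvCtx g) (d2.getD (pvCtx g) 0 + 1)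
         else d2.insert (pvCtx g) 1) = _
    rw [pvStep_if_eq d1 g, pvStep_if_eq d2 (pvCtx g), ih]
    rfl

-- A's nested pair-fold, flattened to two independent folds over the gram stream
lemma n_gram_context_maker_eq (text : List (List Int)) (ngram_len : Int) :
    n_gram_context_maker text ngram_len =
      ((PySem.Dict.counter (pvG text ngram_len)).items,
       (pvWFold ((pvG text ngram_len).map (fun g => (pvCtx g, 1))) PySem.Dict.empty).items) := by
  unfold n_gram_context_maker
  have hF : (fun (st : PySem.Dict (List Int) Int × PySem.Dict (List Int) Int) line =>
      (PySem.List.pyRange 0 ((List.length line : Int) - ngram_len + 1) 1).foldl (fun st i =>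
        let ngram := PySem.List.slice line (some i) (some (i + ngram_len))
        let context := PySem.List.slice ngram (some 0) (some (-1))
        (if st.1.contains ngram then st.1.insert ngram (st.1.getD ngram 0 + 1)
         else st.1.insert ngram 1,
         if st.2.contains context then st.2.insert context (st.2.getD context 0 + 1)
         else st.2.insert context 1)) st)
      = (fun st line => (pvGrams ngram_len line).foldl pvPairStep st) := by
    funext st line
    rw [pvGrams, List.foldl_map]
    rfl
  rw [hF]
  have key : List.foldl (fun st line => List.foldl pvPairStep st (pvGrams ngram_len line))
      ((PySem.Dict.empty : PySem.Dict (List Int) Int), (PySem.Dict.empty : PySem.Dict (List Int) Int)) text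
      = (PySem.Dict.counter (pvG text ngram_len),
         pvWFold ((pvG text ngram_len).map (fun g => (pvCtx g, 1))) PySem.Dict.empty) := by
    rw [← List.foldl_flatMap, ← pvG, pvPairStep_foldl,
      PySem.Dict.foldl_insert_getD_add_one_eq_counter, pvWFold, List.foldl_map]
  exact congrArg (fun st => (st.1.items, st.2.items)) key

-- B, normalised: the same counter, then the marginal over its items
lemma n_gram_context_maker_alt_eq (text : List (List Int)) (ngram_len : Int) :
    n_gram_context_maker_alt text ngram_len =
      ((PySem.Dict.counter (pvG text ngram_len)).items,
       (pvWFold ((PySem.Set.ofList (pvG text ngram_len)).map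
          (fun g => (pvCtx g, ((pvG text ngram_len).count g : Int)))) PySem.Dict.empty).items) := by
  unfold n_gram_context_maker_alt
  have hF : (fun (nc : PySem.Dict (List Int) Int) line =>
      (PySem.List.pyRange 0 ((List.length line : Int) - ngram_len + 1) 1).foldl (fun nc i =>
        let ng := PySem.List.slice line (some i) (some (i + ngram_len))
        nc.insert ng (nc.getD ng 0 + 1)) nc)
      = (fun nc line => (pvGrams ngram_len line).foldl (fun d g => d.insert g (d.getD g 0 + 1)) nc) := by
    funext nc line
    rw [pvGrams, List.foldl_map]
  rw [hF]
  have key : List.foldl (fun nc line =>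
        List.foldl (fun d g => d.insert g (d.getD g 0 + 1)) nc (pvGrams ngram_len line))
      (PySem.Dict.empty : PySem.Dict (List Int) Int) text
      = PySem.Dict.counter (pvG text ngram_len) := by
    rw [← List.foldl_flatMap, ← pvG, PySem.Dict.foldl_insert_getD_add_one_eq_counter]
  rw [key, pvWFold]
  have hmap : (PySem.Set.ofList (pvG text ngram_len)).map
        (fun y => (pvCtx y, ((pvG text ngram_len).count y : Int)))
      = (PySem.Dict.counter (pvG text ngram_len)).items.map (fun p => (pvCtx p.1, p.2)) := by
    rw [PySem.Dict.items_counter, List.map_map]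
    rfl
  rw [hmap, List.foldl_map]
  rfl

-- value of a weighted counting fold
lemma pvWFold_getD (L : List (List Int × Int)) (d : PySem.Dict (List Int) Int) (k : List Int) :
    (pvWFold L d).getD k 0 = d.getD k 0 + ((L.filter (fun p => p.1 == k)).map (·.2)).sum := by
  induction L generalizing d with
  | nil => simp [pvWFold]
  | cons p L ih =>
    simp only [pvWFold, List.foldl_cons] at *
    rw [ih]
    by_cases h : p.1 = k
    · simp [pvWStep, h]; ring
    · simp [pvWStep, h, PySem.Dict.getD_insert, Ne.symm h]

-- keys of a weighted counting fold from empty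
lemma pvWFold_keys (L : List (List Int × Int)) :
    (pvWFold L PySem.Dict.empty).keys = PySem.Set.ofList (L.map (·.1)) := by
  have h := PySem.Dict.keys_foldl_insert_key L (fun p => p.1)
      (fun d p => d.getD p.1 0 + p.2) PySem.Dict.empty
  simpa [pvWFold, pvWStep, PySem.Set.update_nil_left] using h

lemma pvWFold_nodup (L : List (List Int × Int)) :
    (pvWFold L PySem.Dict.empty).keys.Nodup := by
  have h := PySem.Dict.nodup_keys_foldl_insert_key L (fun p => p.1)
      (fun d p => d.getD p.1 0 + p.2) PySem.Dict.empty (by simp)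
  simpa [pvWFold, pvWStep] using h

-- first occurrences commute with mapping: set(map f (set l)) = set(map f l)
lemma pvSet_map_ofList (l : List (List Int)) (f : List Int → List Int) :
    PySem.Set.ofList ((PySem.Set.ofList l).map f) = PySem.Set.ofList (l.map f) := by
  induction l using List.reverseRecOn with
  | nil => simp
  | append_singleton l x ih =>
    rw [PySem.Set.ofList_append_singleton]
    by_cases hx : x ∈ l
    · rw [PySem.Set.add_of_mem (by simpa [PySem.Set.mem_ofList] using hx)]
      rw [ih, List.map_append, List.map_singleton, PySem.Set.ofList_append_singleton]
      rw [PySem.Set.add_of_mem (by simp [PySem.Set.mem_ofList]; exact ⟨x, hx, rfl⟩)]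
    · rw [PySem.Set.add_of_not_mem (by simpa [PySem.Set.mem_ofList] using hx)]
      rw [List.map_append, List.map_singleton, PySem.Set.ofList_append_singleton, ih,
        List.map_append, List.map_singleton, PySem.Set.ofList_append_singleton]

-- summing each distinct element's multiplicity over a filter is counting the filter
lemma pvCountSum (l : List (List Int)) (q : List Int → Bool) :
    ((((PySem.Set.ofList l).filter q).map (fun g => (l.count g : Int))).sum)
      = (l.countP q : Int) := by
  induction l using List.reverseRecOn with
  | nil => simp
  | append_singleton l x ih =>
    rw [PySem.Set.ofList_append_singleton, List.countP_append]
    by_cases hx : x ∈ l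
    · rw [PySem.Set.add_of_mem (by simpa [PySem.Set.mem_ofList] using hx)]
      have hcnt : ∀ g, (List.count g (l ++ [x]) : Int)
          = (l.count g : Int) + (if g = x then 1 else 0) := by
        intro g
        rw [List.count_append]
        rw [List.count_singleton]
        by_cases hgx : g = x
        · simp [hgx]
        · simp [hgx, Ne.symm hgx]
      rw [List.map_congr_left (fun g _ => hcnt g), PySem.List.sum_map_add_int, ih]
      have h01 : ((((PySem.Set.ofList l).filter q).map (fun g => if g = x then (1:Int) else 0)).sum)
          = (((PySem.Set.ofList l).filter q).countP (fun g => g == x) : Int) := by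
        rw [← PySem.List.sum_map_ite_one_zero (fun g => g == x)]
        simp
      rw [h01]
      have hnd : ((PySem.Set.ofList l).filter q).Nodup := (PySem.Set.nodup_ofList l).filter q
      rw [← List.count_eq_countP]
      by_cases hq : q x
      · have : x ∈ (PySem.Set.ofList l).filter q := by
          simp [List.mem_filter, PySem.Set.mem_ofList, hx, hq]
        rw [List.count_eq_one_of_mem hnd this]
        simp [hq]
      · have : x ∉ (PySem.Set.ofList l).filter q := by
          simp [List.mem_filter, hq]
        rw [List.count_eq_zero.mpr this]
        simp [hq]
    · rw [PySem.Set.add_of_not_mem (by simpa [PySem.Set.mem_ofList] using hx)]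
      rw [List.filter_append, List.map_append, List.sum_append]
      have hcnt : ∀ g ∈ (PySem.Set.ofList l).filter q, (List.count g (l ++ [x]) : Int) = (l.count g : Int) := by
        intro g hg
        have hgl : g ∈ l := by
          have := (List.mem_filter.mp hg).1
          simpa [PySem.Set.mem_ofList] using this
        have hgx : g ≠ x := fun h => hx (h ▸ hgl)
        rw [List.count_append]
        simp [hgx.symm]
      rw [List.map_congr_left hcnt, ih]
      have hx0 : l.count x = 0 := List.count_eq_zero.mpr hx
      by_cases hq : q x
      · simp [hq, List.count_append, hx0]
      · simp [hq]


-- the marginal of the counter equals direct weighted counting of the stream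
lemma pvMarginal (l : List (List Int)) (f : List Int → List Int) :
    (pvWFold ((PySem.Set.ofList l).map (fun g => (f g, (l.count g : Int)))) PySem.Dict.empty).items
      = (pvWFold (l.map (fun g => (f g, 1))) PySem.Dict.empty).items := by
  rw [PySem.Dict.items_eq_map_keys _ (pvWFold_nodup _) 0,
      PySem.Dict.items_eq_map_keys _ (pvWFold_nodup _) 0]
  rw [pvWFold_keys, pvWFold_keys, List.map_map, List.map_map,
      Function.comp_def, Function.comp_def, pvSet_map_ofList]
  apply List.map_congr_left
  intro k _
  congr 1
  rw [pvWFold_getD, pvWFold_getD]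
  congr 1
  · simp only [List.filter_map, List.map_map, Function.comp_def]
    rw [pvCountSum l (fun g => f g == k)]
    simp [List.countP_eq_length_filter]

-- ===== VERDICT (by name: the statement is the Claim_ definition above) =====
theorem n_gram_context_maker_spec : Claim_equal_n_gram_context_maker := by
  intro text ngram_len _
  unfold Spec_n_gram_context_maker
  rw [n_gram_context_maker_eq, n_gram_context_maker_alt_eq]
  exact congrArg _ (pvMarginal (pvG text ngram_len) pvCtx).symm
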